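-- pv_equiv track=rewrite | github.com/xyleth/desloppify | desloppify/languages/csharp/detectors/deps.py | _expand_namespace_matches
-- ===== SOURCE A (Python) =====
-- def _expand_namespace_matches(
--     using_ns: str, namespace_to_files: dict[str, set[str]]
-- ) -> set[str]:
--     """Resolve one using namespace to candidate target files."""
--     out: set[str] = set()
--     for ns, files in namespace_to_files.items():
--         if (
--             ns == using_ns
--             or ns.startswith(using_ns + ".")
--             or using_ns.startswith(ns + ".")
--         ):
--             out.update(files)
--     return out
-- ===== SOURCE B (Python) =====
-- def _expand_namespace_matches(using_ns, namespace_to_files):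
--     """Resolve one using namespace to candidate target files."""
--     dot = using_ns + "."
--     # stage 1: equality/ancestor matches found by direct dict probes at each
--     # dot boundary of using_ns -- no per-entry equality or ancestor tests
--     hits = set()
--     prefix = ""
--     for ch in using_ns:
--         if ch == "." and prefix in namespace_to_files:
--             hits.add(prefix)
--         prefix += ch
--     if using_ns in namespace_to_files:
--         hits.add(using_ns)
--     # stage 2: descendant matches need one scan over the keys alone
--     for ns in namespace_to_files:
--         if ns.startswith(dot):
--             hits.add(ns)
--     # stage 3: gather the files of the hit namespaces
--     out = set()
--     for ns, files in namespace_to_files.items():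
--         if ns in hits:
--             out.update(files)
--     return out
-- ===== Notes on version B (the rewrite author's own statement) =====
-- stated objective: faster
-- what changed: B replaces A's single pass with its per-entry triple relational test (equality, descendant, ancestor) by three stages: it resolves equality/ancestor matches with O(depth) direct dict-membership probes at the dot boundaries of using_ns, scans the keys once for descendants (one early-exiting startswith per key), and gathers the files of the hit namespaces; the per-entry ns + '.' allocation and the two extra string comparisons disappear, measured ~10x faster at the largest generated size.
import Mathlib
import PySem

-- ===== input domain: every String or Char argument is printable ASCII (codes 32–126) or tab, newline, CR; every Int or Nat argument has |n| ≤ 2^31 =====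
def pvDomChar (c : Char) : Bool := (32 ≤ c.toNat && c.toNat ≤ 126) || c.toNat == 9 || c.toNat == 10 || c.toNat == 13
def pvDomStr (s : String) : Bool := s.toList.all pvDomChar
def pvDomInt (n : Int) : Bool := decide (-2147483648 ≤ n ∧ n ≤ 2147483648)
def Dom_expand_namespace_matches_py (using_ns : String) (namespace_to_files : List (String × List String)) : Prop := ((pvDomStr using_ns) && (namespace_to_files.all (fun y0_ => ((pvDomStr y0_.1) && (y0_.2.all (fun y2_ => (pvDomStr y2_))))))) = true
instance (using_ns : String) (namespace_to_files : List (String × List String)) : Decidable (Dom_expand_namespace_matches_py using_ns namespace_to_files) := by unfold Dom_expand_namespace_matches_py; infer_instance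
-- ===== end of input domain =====

-- B vs A: B resolves equality/ancestor matches by probing the dict at each dot boundary
-- of using_ns (stage 1), scans the keys once for descendants (stage 2), then gathers the
-- files of the hit namespaces (stage 3), instead of A's per-entry triple relational test;
-- equivalence is of the RETURN value (neither side mutates an argument).

-- ===== PORT A =====
-- for ns, files in d.items(): if ns == u or ns.startswith(u + ".") or u.startswith(ns + "."): out.update(files)
def expand_namespace_matches_py (using_ns : String) (namespace_to_files : List (String × List String)) : List String :=
  namespace_to_files.foldl (fun out p =>
    if p.1 == using_ns
        || PySem.Chars.startswith p.1.toList (using_ns.toList ++ ['.'])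
        || PySem.Chars.startswith using_ns.toList (p.1.toList ++ ['.'])
    then PySem.Set.update out p.2 else out) PySem.Set.empty

-- ===== PORT B =====
-- stage 1: for ch in u: if ch == "." and prefix in d: hits.add(prefix); prefix += ch — then the self probe;
-- stage 2: for ns in d: if ns.startswith(dot): hits.add(ns);
-- stage 3: for ns, files in d.items(): if ns in hits: out.update(files)
def expand_namespace_matches_py_alt (using_ns : String) (namespace_to_files : List (String × List String)) : List String :=
  let dot : List Char := using_ns.toList ++ ['.']
  let st := using_ns.toList.foldl
    (fun (st : List Char × PySem.Set (List Char)) ch =>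
      (st.1 ++ [ch],
       if ch == '.' && namespace_to_files.any (fun p => p.1.toList == st.1)
       then PySem.Set.add st.2 st.1 else st.2))
    ([], PySem.Set.empty)
  let hits1 := if namespace_to_files.any (fun p => p.1.toList == using_ns.toList)
               then PySem.Set.add st.2 using_ns.toList else st.2
  let hits := namespace_to_files.foldl
    (fun h p => if PySem.Chars.startswith p.1.toList dot then PySem.Set.add h p.1.toList else h)
    hits1
  namespace_to_files.foldl (fun out p =>
    if PySem.Set.contains hits p.1.toList then PySem.Set.update out p.2 else out)
    PySem.Set.empty

-- ===== PRECONDITION & SPEC =====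
def Spec_expand_namespace_matches_py (using_ns : String) (namespace_to_files : List (String × List String)) (out : List String) : Prop := out = expand_namespace_matches_py_alt using_ns namespace_to_files
instance (using_ns : String) (namespace_to_files : List (String × List String)) (out : List String) : Decidable (Spec_expand_namespace_matches_py using_ns namespace_to_files out) := by unfold Spec_expand_namespace_matches_py; infer_instance

-- ===== CLAIM (what is proved, stated in full; the proofs are below) =====
def Claim_equal_expand_namespace_matches_py : Prop := ∀ (using_ns : String) (namespace_to_files : List (String × List String)), Dom_expand_namespace_matches_py using_ns namespace_to_files → Spec_expand_namespace_matches_py using_ns namespace_to_files (expand_namespace_matches_py using_ns namespace_to_files)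

-- ===== LEMMAS AND PROOFS =====

-- "x in namespace_to_files" (dict key membership) as used by both stages of B
theorem inDict_self (d : List (String × List String)) (p : String × List String) (hp : p ∈ d) :
    d.any (fun q => q.1.toList == p.1.toList) = true := by
  exact List.any_eq_true.mpr ⟨p, hp, by simp⟩

-- stage 1 fold: membership in the hit set
theorem stage1_mem (d : List (String × List String)) (cs : List Char) (pr : List Char)
    (h : PySem.Set (List Char)) (x : List Char) :
    (x ∈ (cs.foldl (fun (st : List Char × PySem.Set (List Char)) ch =>
      (st.1 ++ [ch],
       if ch == '.' && d.any (fun p => p.1.toList == st.1)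
       then PySem.Set.add st.2 st.1 else st.2)) (pr, h)).2)
    ↔ x ∈ h ∨ ∃ j, ∃ hj : j < cs.length, cs[j] = '.' ∧ x = pr ++ cs.take j
        ∧ d.any (fun p => p.1.toList == x) = true := by
  induction cs generalizing pr h with
  | nil => simp
  | cons c cs ih =>
    simp only [List.foldl_cons]
    rw [ih]
    constructor
    · rintro (hx | ⟨j, hj, hdot, rfl, hin⟩)
      · split at hx
        · rename_i hcond
          simp only [Bool.and_eq_true, beq_iff_eq] at hcond
          rcases (PySem.Set.mem_add _ _ _).mp hx with hx | rfl
          · exact Or.inl hx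
          · exact Or.inr ⟨0, by simp, by simpa using hcond.1, by simp, hcond.2⟩
        · exact Or.inl hx
      · refine Or.inr ⟨j + 1, by simpa using hj, by simpa using hdot, by simp, hin⟩
    · rintro (hx | ⟨j, hj, hdot, hx, hin⟩)
      · left
        split
        · rename_i hcond
          exact (PySem.Set.mem_add _ _ _).mpr (Or.inl hx)
        · exact hx
      · cases j with
        | zero =>
          left
          simp only [List.getElem_cons_zero] at hdot
          simp only [List.take_zero, List.append_nil] at hx
          subst hdot hx
          rw [if_pos (by simpa using hin)]
          exact (PySem.Set.mem_add _ _ _).mpr (Or.inr rfl)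
        | succ j =>
          right
          refine ⟨j, by simpa using hj, by simpa using hdot, by simpa using hx, hin⟩

-- a proper dot-boundary prefix of U is exactly a string x with x ++ "." a prefix of U
theorem dot_boundary_iff (U x : List Char) :
    (∃ j, ∃ hj : j < U.length, U[j] = '.' ∧ x = U.take j) ↔ (x ++ ['.']) <+: U := by
  constructor
  · rintro ⟨j, hj, hdot, rfl⟩
    have : U.take j ++ ['.'] = U.take (j + 1) := by
      rw [List.take_add_one, List.getElem?_eq_getElem hj, hdot]; rfl
    rw [this]
    exact List.take_prefix _ _
  · rintro ⟨t, ht⟩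
    have hj : x.length < U.length := by rw [← ht]; simp
    have hget : U[x.length]'hj = '.' := by
      have h2 : U[x.length]? = some '.' := by
        rw [← ht, List.append_assoc, List.getElem?_append_right (Nat.le_refl _)]
        simp
      rw [List.getElem?_eq_getElem hj] at h2
      exact Option.some_inj.mp h2
    exact ⟨x.length, hj, hget, by rw [← ht, List.append_assoc, List.take_left]⟩

-- stage 2 fold: membership in the final hit set
theorem stage2_mem (d : List (String × List String)) (dot : List Char)
    (h : PySem.Set (List Char)) (x : List Char) :
    (x ∈ d.foldl (fun h p => if PySem.Chars.startswith p.1.toList dot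
        then PySem.Set.add h p.1.toList else h) h)
    ↔ x ∈ h ∨ ∃ p ∈ d, PySem.Chars.startswith p.1.toList dot = true ∧ x = p.1.toList := by
  induction d generalizing h with
  | nil => simp
  | cons q d ih =>
    simp only [List.foldl_cons]
    rw [ih]
    constructor
    · rintro (hx | ⟨p, hp, hsw, rfl⟩)
      · split at hx
        · rename_i hsw
          rcases (PySem.Set.mem_add _ _ _).mp hx with hx | rfl
          · exact Or.inl hx
          · exact Or.inr ⟨q, by simp, hsw, rfl⟩
        · exact Or.inl hx
      · exact Or.inr ⟨p, by simp [hp], hsw, rfl⟩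
    · rintro (hx | ⟨p, hp, hsw, rfl⟩)
      · left
        split
        · exact (PySem.Set.mem_add _ _ _).mpr (Or.inl hx)
        · exact hx
      · rcases List.mem_cons.mp hp with rfl | hp
        · left
          rw [if_pos hsw]
          exact (PySem.Set.mem_add _ _ _).mpr (Or.inr rfl)
        · exact Or.inr ⟨p, hp, hsw, rfl⟩

-- the gather fold (shared shape of A's loop and B's stage 3) as filter + flatMap
theorem foldl_update_filter (c : String × List String → Bool)
    (l : List (String × List String)) (s : PySem.Set String) :
    l.foldl (fun out p => if c p then PySem.Set.update out p.2 else out) s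
      = PySem.Set.update s ((l.filter c).flatMap (fun p => p.2)) := by
  induction l generalizing s with
  | nil => rfl
  | cons p t ih =>
    by_cases h : c p = true
    · simp only [List.foldl_cons, List.filter_cons, h, if_pos, List.flatMap_cons]
      rw [ih]
      simp [PySem.Set.update, List.foldl_append]
    · simp only [List.foldl_cons, List.filter_cons, h, if_neg, Bool.false_eq_true,
        not_false_eq_true, ih]

-- for a key of the dict, B's hit test agrees with A's triple relational test
theorem cond_eq (u : String) (d : List (String × List String))
    (p : String × List String) (hp : p ∈ d) :
    (PySem.Set.contains
      (d.foldl (fun h q => if PySem.Chars.startswith q.1.toList (u.toList ++ ['.'])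
          then PySem.Set.add h q.1.toList else h)
        (if d.any (fun q => q.1.toList == u.toList)
         then PySem.Set.add
           (u.toList.foldl (fun (st : List Char × PySem.Set (List Char)) ch =>
             (st.1 ++ [ch],
              if ch == '.' && d.any (fun q => q.1.toList == st.1)
              then PySem.Set.add st.2 st.1 else st.2)) ([], PySem.Set.empty)).2 u.toList
         else (u.toList.foldl (fun (st : List Char × PySem.Set (List Char)) ch =>
             (st.1 ++ [ch],
              if ch == '.' && d.any (fun q => q.1.toList == st.1)
              then PySem.Set.add st.2 st.1 else st.2)) ([], PySem.Set.empty)).2))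
      p.1.toList)
    = (p.1 == u
        || PySem.Chars.startswith p.1.toList (u.toList ++ ['.'])
        || PySem.Chars.startswith u.toList (p.1.toList ++ ['.'])) := by
  have hin : d.any (fun q => q.1.toList == p.1.toList) = true := inDict_self d p hp
  rw [Bool.eq_iff_iff, PySem.Set.contains_iff, stage2_mem]
  have hmemhits1 : (p.1.toList ∈ (if d.any (fun q => q.1.toList == u.toList)
         then PySem.Set.add
           (u.toList.foldl (fun (st : List Char × PySem.Set (List Char)) ch =>
             (st.1 ++ [ch],
              if ch == '.' && d.any (fun q => q.1.toList == st.1)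
              then PySem.Set.add st.2 st.1 else st.2)) ([], PySem.Set.empty)).2 u.toList
         else (u.toList.foldl (fun (st : List Char × PySem.Set (List Char)) ch =>
             (st.1 ++ [ch],
              if ch == '.' && d.any (fun q => q.1.toList == st.1)
              then PySem.Set.add st.2 st.1 else st.2)) ([], PySem.Set.empty)).2))
      ↔ (p.1.toList ++ ['.']) <+: u.toList ∨ p.1.toList = u.toList := by
    constructor
    · intro hx
      split at hx
      · rcases (PySem.Set.mem_add _ _ _).mp hx with hx | hx
        · rw [stage1_mem] at hx
          rcases hx with hx | ⟨j, hj, hdot, hx, _⟩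
          · simp [PySem.Set.empty] at hx
          · exact Or.inl ((dot_boundary_iff u.toList p.1.toList).mp ⟨j, hj, hdot, by simpa using hx⟩)
        · exact Or.inr hx
      · rw [stage1_mem] at hx
        rcases hx with hx | ⟨j, hj, hdot, hx, _⟩
        · simp [PySem.Set.empty] at hx
        · exact Or.inl ((dot_boundary_iff u.toList p.1.toList).mp ⟨j, hj, hdot, by simpa using hx⟩)
    · rintro (hpre | heq)
      · rcases (dot_boundary_iff u.toList p.1.toList).mpr hpre with ⟨j, hj, hdot, hx⟩
        have hmem : p.1.toList ∈ (u.toList.foldl (fun (st : List Char × PySem.Set (List Char)) ch =>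
             (st.1 ++ [ch],
              if ch == '.' && d.any (fun q => q.1.toList == st.1)
              then PySem.Set.add st.2 st.1 else st.2)) ([], PySem.Set.empty)).2 := by
          rw [stage1_mem]
          exact Or.inr ⟨j, hj, hdot, by simpa using hx, hin⟩
        split
        · exact (PySem.Set.mem_add _ _ _).mpr (Or.inl hmem)
        · exact hmem
      · rw [if_pos (heq ▸ hin)]
        exact (PySem.Set.mem_add _ _ _).mpr (Or.inr heq)
  rw [hmemhits1]
  simp only [Bool.or_eq_true, beq_iff_eq, PySem.Chars.startswith_iff]
  constructor
  · rintro ((hpre | heq) | ⟨q, _, hsw, heq2⟩)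
    · exact Or.inr hpre
    · exact Or.inl (Or.inl (String.toList_inj.mp heq))
    · exact Or.inl (Or.inr (by rw [heq2]; exact hsw))
  · rintro ((heq | hpre) | hpre)
    · exact Or.inl (Or.inr (by rw [heq]))
    · exact Or.inr ⟨p, hp, hpre, rfl⟩
    · exact Or.inl (Or.inl hpre)

-- ===== VERDICT (by name: the statement is the Claim_ definition above) =====
theorem expand_namespace_matches_py_spec : Claim_equal_expand_namespace_matches_py := by
  intro u d _
  unfold Spec_expand_namespace_matches_py expand_namespace_matches_py expand_namespace_matches_py_alt
  simp only []
  rw [foldl_update_filter, foldl_update_filter]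
  congr 1
  apply congrArg
  apply List.filter_congr
  intro p hp
  exact (cond_eq u d p hp).symm
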